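-- pv_equiv track=rewrite | github.com/wyk18703232953/myResearch | codeComplex/data/filteredData/python/linear/python_linear_0829.py | solve_single_case
-- ===== SOURCE A (Python) =====
-- def matches(pos, c, case):
--     if case == 0:
--         return pos % 3 == "RGB".index(c)
--     elif case == 1:
--         return pos % 3 == "GBR".index(c)
--
--     else:
--         return pos % 3 == "BRG".index(c)
--
-- def solve_single_case(n, k, s):
--     mglobal = k
--     r = g = b = 0
--
--     for i, c in enumerate(s[:k]):
--         r += not matches(i, c, 0)
--         g += not matches(i, c, 1)
--         b += not matches(i, c, 2)
--
--     mglobal = min(mglobal, r, g, b)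
--
--     for i, c in enumerate(s[k:]):
--         i += k
--         r += -(not matches(i - k, s[i - k], 0)) + (not matches(i, c, 0))
--         g += -(not matches(i - k, s[i - k], 1)) + (not matches(i, c, 1))
--         b += -(not matches(i - k, s[i - k], 2)) + (not matches(i, c, 2))
--         mglobal = min(mglobal, r, g, b)
--
--     return mglobal
-- ===== SOURCE B (Python) =====
-- def solve_single_case(n, k, s):
--     L = len(s)
--     prefs = []
--     for pat in ("RGB", "GBR", "BRG"):
--         P = [0]
--         for i, c in enumerate(s):
--             P.append(P[-1] + (c != pat[i % 3]))
--         prefs.append(P)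
--     best = k
--     for j in range(max(L - k, 0) + 1):
--         e = min(j + k, L)
--         for P in prefs:
--             best = min(best, P[e] - P[j])
--     return best
-- ===== Notes on version B (the rewrite author's own statement) =====
-- stated objective: alternative
-- what changed: A maintains three sliding-window mismatch counters updated in lockstep; B precomputes one prefix-sum array of mismatch costs per cyclic pattern and reads each window's cost as a difference of two prefix sums.
-- outside the precondition, e.g. on solve_single_case(3, -1, 'RGB'): A returns -1, B raises IndexError
import Mathlib
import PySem

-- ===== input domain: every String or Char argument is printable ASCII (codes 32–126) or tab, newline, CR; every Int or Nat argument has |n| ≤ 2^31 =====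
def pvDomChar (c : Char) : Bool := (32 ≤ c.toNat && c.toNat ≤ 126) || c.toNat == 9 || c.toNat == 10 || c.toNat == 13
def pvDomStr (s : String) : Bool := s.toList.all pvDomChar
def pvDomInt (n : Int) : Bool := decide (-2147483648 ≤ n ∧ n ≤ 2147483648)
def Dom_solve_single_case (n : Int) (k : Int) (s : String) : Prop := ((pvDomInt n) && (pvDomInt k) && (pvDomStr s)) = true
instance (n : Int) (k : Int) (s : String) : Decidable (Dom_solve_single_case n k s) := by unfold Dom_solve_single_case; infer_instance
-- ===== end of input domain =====

-- B replaces A's three interleaved sliding-window accumulators by per-pattern prefix-sum arrays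
-- and reads each window cost off the prefix sums (objective: alternative decomposition, same cost).

-- ===== PORT A =====
-- "RGB".index(c): Python raises ValueError when c ∉ "RGB"; those inputs are excluded by
-- Pre_solve_single_case, so the port takes the index via index? with an arbitrary default.
def pyMatches (pos : Int) (c : Char) (case_ : Int) : Bool :=
  if case_ = 0 then
    PySem.Int.mod pos 3 == (((PySem.List.index? "RGB".toList c).getD 0 : Nat) : Int)
  else if case_ = 1 then
    PySem.Int.mod pos 3 == (((PySem.List.index? "GBR".toList c).getD 0 : Nat) : Int)
  else
    PySem.Int.mod pos 3 == (((PySem.List.index? "BRG".toList c).getD 0 : Nat) : Int)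

def solve_single_case (n : Int) (k : Int) (s : String) : Int :=
  let mglobal : Int := k
  -- for i, c in enumerate(s[:k]): r/g/b += not matches(i, c, case)
  let st1 :=
    (PySem.List.enumerate (PySem.List.slice s.toList none (some k)) 0).foldl
      (fun (st : Int × Int × Int) ic =>
        (st.1 + (if pyMatches ic.1 ic.2 0 then 0 else 1),
         st.2.1 + (if pyMatches ic.1 ic.2 1 then 0 else 1),
         st.2.2 + (if pyMatches ic.1 ic.2 2 then 0 else 1)))
      (0, 0, 0)
  let mglobal := min (min (min mglobal st1.1) st1.2.1) st1.2.2
  -- for i, c in enumerate(s[k:]): i += k; slide the window; mglobal = min(...)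
  -- s[i - k]: in range whenever Pre_ holds; Python's IndexError inputs are outside Pre_.
  let st2 :=
    (PySem.List.enumerate (PySem.List.slice s.toList (some k) none) 0).foldl
      (fun (st : Int × Int × Int × Int) ic =>
        let i : Int := ic.1 + k
        let prev : Char := (PySem.Str.pyGet? s (i - k)).getD ' '
        let r := st.2.1 - (if pyMatches (i - k) prev 0 then 0 else 1)
                        + (if pyMatches i ic.2 0 then 0 else 1)
        let g := st.2.2.1 - (if pyMatches (i - k) prev 1 then 0 else 1)
                          + (if pyMatches i ic.2 1 then 0 else 1)
        let b := st.2.2.2 - (if pyMatches (i - k) prev 2 then 0 else 1)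
                          + (if pyMatches i ic.2 2 then 0 else 1)
        (min (min (min st.1 r) g) b, r, g, b))
      (mglobal, st1.1, st1.2.1, st1.2.2)
  st2.1

-- ===== PORT B =====
-- pat[i % 3]: pat has length 3, so i % 3 is always in range; getD's default is never read.
def altPrefix (pat : List Char) (s : List Char) : List Int :=
  (PySem.List.enumerate s 0).foldl
    (fun (P : List Int) ic =>
      P ++ [(PySem.List.pyGet? P (-1)).getD 0 +
            (if ic.2 ≠ pat.getD (ic.1.toNat % 3) ' ' then 1 else 0)])
    [0]

def solve_single_case_alt (n : Int) (k : Int) (s : String) : Int :=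
  let L : Int := s.toList.length
  let prefs := ["RGB".toList, "GBR".toList, "BRG".toList].map (fun pat => altPrefix pat s.toList)
  (PySem.List.pyRange 0 (max (L - k) 0 + 1) 1).foldl
    (fun best j =>
      let e : Int := min (j + k) L
      prefs.foldl
        (fun best P => min best ((PySem.List.pyGet? P e).getD 0 - (PySem.List.pyGet? P j).getD 0))
        best)
    k

-- ===== PRECONDITION & SPEC =====
-- Pre_ restricts to the task's natural domain: a nonnegative window length and a string over the
-- pattern alphabet. Python A raises ValueError on any character outside "RGB"; for k < 0 A still
-- returns a (meaningless, possibly negative) value while B's indexing raises, so k < 0 is excluded.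
def Pre_solve_single_case (n : Int) (k : Int) (s : String) : Prop :=
  0 ≤ k ∧ s.toList.all (fun c => c == 'R' || c == 'G' || c == 'B') = true
instance (n : Int) (k : Int) (s : String) : Decidable (Pre_solve_single_case n k s) := by
  unfold Pre_solve_single_case; infer_instance

def pvWitness_solve_single_case : Int × Int × String := (3, 2, "RGB")

def Spec_solve_single_case (n : Int) (k : Int) (s : String) (out : Int) : Prop := out = solve_single_case_alt n k s
instance (n : Int) (k : Int) (s : String) (out : Int) : Decidable (Spec_solve_single_case n k s out) := by unfold Spec_solve_single_case; infer_instance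

-- ===== CLAIM (what is proved, stated in full; the proofs are below) =====
def Claim_equal_solve_single_case : Prop := ∀ (n : Int) (k : Int) (s : String), Dom_solve_single_case n k s → Pre_solve_single_case n k s → Spec_solve_single_case n k s (solve_single_case n k s)

-- ===== LEMMAS AND PROOFS =====
lemma pymod3 (m : Nat) : PySem.Int.mod (m : Int) 3 = ((m % 3 : Nat) : Int) := by
  have := PySem.Int.mod_eq_emod_of_pos (a := (m : Int)) (b := 3) (by omega)
  rw [this]; push_cast; rfl

lemma matches0 (m : Nat) (c : Char) (hc : c = 'R' ∨ c = 'G' ∨ c = 'B') :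
    pyMatches (m : Int) c 0 = decide (c = "RGB".toList.getD (m % 3) ' ') := by
  have h3 : m % 3 = 0 ∨ m % 3 = 1 ∨ m % 3 = 2 := by omega
  rcases hc with rfl | rfl | rfl <;> rcases h3 with h | h | h <;>
    · rw [pyMatches, if_pos rfl, pymod3, h]; decide

lemma matches1 (m : Nat) (c : Char) (hc : c = 'R' ∨ c = 'G' ∨ c = 'B') :
    pyMatches (m : Int) c 1 = decide (c = "GBR".toList.getD (m % 3) ' ') := by
  have h3 : m % 3 = 0 ∨ m % 3 = 1 ∨ m % 3 = 2 := by omega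
  rcases hc with rfl | rfl | rfl <;> rcases h3 with h | h | h <;>
    · rw [pyMatches, if_neg (by decide), if_pos rfl, pymod3, h]; decide

lemma matches2 (m : Nat) (c : Char) (hc : c = 'R' ∨ c = 'G' ∨ c = 'B') :
    pyMatches (m : Int) c 2 = decide (c = "BRG".toList.getD (m % 3) ' ') := by
  have h3 : m % 3 = 0 ∨ m % 3 = 1 ∨ m % 3 = 2 := by omega
  rcases hc with rfl | rfl | rfl <;> rcases h3 with h | h | h <;>
    · rw [pyMatches, if_neg (by decide), if_neg (by decide), pymod3, h]; decide

def pcost (pat t : List Char) (m : Nat) : Int :=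
  if t.getD m ' ' = pat.getD (m % 3) ' ' then 0 else 1

def Pf (pat t : List Char) : Nat → Int
  | 0 => 0
  | (m+1) => Pf pat t m + pcost pat t m

def RGBc (c : Char) : Prop := c = 'R' ∨ c = 'G' ∨ c = 'B'

lemma cost0 (t : List Char) (m : Nat) (c : Char) (hc : RGBc c) (heq : c = t.getD m ' ') :
    (if pyMatches (m : Int) c 0 then (0:Int) else 1) = pcost "RGB".toList t m := by
  rw [matches0 m c hc, pcost, ← heq]
  by_cases h : c = "RGB".toList.getD (m % 3) ' ' <;> simp [h]

lemma cost1 (t : List Char) (m : Nat) (c : Char) (hc : RGBc c) (heq : c = t.getD m ' ') :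
    (if pyMatches (m : Int) c 1 then (0:Int) else 1) = pcost "GBR".toList t m := by
  rw [matches1 m c hc, pcost, ← heq]
  by_cases h : c = "GBR".toList.getD (m % 3) ' ' <;> simp [h]

lemma cost2 (t : List Char) (m : Nat) (c : Char) (hc : RGBc c) (heq : c = t.getD m ' ') :
    (if pyMatches (m : Int) c 2 then (0:Int) else 1) = pcost "BRG".toList t m := by
  rw [matches2 m c hc, pcost, ← heq]
  by_cases h : c = "BRG".toList.getD (m % 3) ' ' <;> simp [h]

-- first loop of A: counting mismatches over a segment of t starting at index i0
lemma loop1 (t : List Char) (l : List Char) :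
    ∀ (i0 : Nat) (r g b : Int),
    (∀ j (hj : j < l.length), l[j] = t.getD (i0 + j) ' ') →
    (∀ c ∈ l, RGBc c) →
    (PySem.List.enumerate l (i0 : Int)).foldl
      (fun (st : Int × Int × Int) ic =>
        (st.1 + (if pyMatches ic.1 ic.2 0 then 0 else 1),
         st.2.1 + (if pyMatches ic.1 ic.2 1 then 0 else 1),
         st.2.2 + (if pyMatches ic.1 ic.2 2 then 0 else 1)))
      (r, g, b)
    = (r + (Pf "RGB".toList t (i0 + l.length) - Pf "RGB".toList t i0),
       g + (Pf "GBR".toList t (i0 + l.length) - Pf "GBR".toList t i0),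
       b + (Pf "BRG".toList t (i0 + l.length) - Pf "BRG".toList t i0)) := by
  induction l with
  | nil => intro i0 r g b _ _; simp [PySem.List.enumerate_nil]
  | cons a l ih =>
    intro i0 r g b hidx hrgb
    rw [PySem.List.enumerate_cons]
    have ha : a = t.getD i0 ' ' := by simpa using hidx 0 (by simp)
    have hca : RGBc a := hrgb a (by simp)
    simp only [List.foldl_cons]
    have e1 : ((i0 : Int) + 1) = ((i0 + 1 : Nat) : Int) := by push_cast; ring
    rw [e1]
    have := ih (i0 + 1) (r + (if pyMatches (i0 : Int) a 0 then 0 else 1))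
      (g + (if pyMatches (i0 : Int) a 1 then 0 else 1))
      (b + (if pyMatches (i0 : Int) a 2 then 0 else 1))
      (fun j hj => by have := hidx (j+1) (by simpa using hj); simpa [Nat.add_assoc, Nat.add_comm 1 j] using this)
      (fun c hc => hrgb c (by simp [hc]))
    rw [this, cost0 t i0 a hca ha, cost1 t i0 a hca ha, cost2 t i0 a hca ha]
    have hPf : ∀ pat : List Char, Pf pat t (i0 + 1) = Pf pat t i0 + pcost pat t i0 := fun pat => rfl
    refine Prod.ext ?_ (Prod.ext ?_ ?_) <;>
      simp [hPf, show i0 + 1 + l.length = i0 + (l.length + 1) by omega] <;> ring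

lemma prefix_loop (pat t : List Char) (l : List Char) :
    ∀ (i0 : Nat),
    (∀ j (hj : j < l.length), l[j] = t.getD (i0 + j) ' ') →
    (PySem.List.enumerate l (i0 : Int)).foldl
      (fun (P : List Int) ic =>
        P ++ [(PySem.List.pyGet? P (-1)).getD 0 +
              (if ic.2 ≠ pat.getD (ic.1.toNat % 3) ' ' then 1 else 0)])
      ((List.range (i0 + 1)).map (Pf pat t))
    = (List.range (i0 + l.length + 1)).map (Pf pat t) := by
  induction l with
  | nil => intro i0 _; simp [PySem.List.enumerate_nil]
  | cons a l ih =>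
    intro i0 hidx
    rw [PySem.List.enumerate_cons]
    simp only [List.foldl_cons]
    have ha : a = t.getD i0 ' ' := by simpa using hidx 0 (by simp)
    have hlast : PySem.List.pyGet? ((List.range (i0 + 1)).map (Pf pat t)) (-1)
        = some (Pf pat t i0) := by
      rw [PySem.List.pyGet?_neg_one, List.range_succ, List.map_append]
      simp
    have hstep : ((List.range (i0 + 1)).map (Pf pat t)) ++
        [(PySem.List.pyGet? ((List.range (i0 + 1)).map (Pf pat t)) (-1)).getD 0 +
         (if a ≠ pat.getD ((i0:Int).toNat % 3) ' ' then 1 else 0)]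
        = (List.range (i0 + 1 + 1)).map (Pf pat t) := by
      rw [hlast]
      rw [List.range_succ (n := i0 + 1), List.map_append]
      simp only [Option.getD_some, Int.toNat_natCast, List.map_cons, List.map_nil]
      congr 2
      show Pf pat t i0 + _ = Pf pat t (i0 + 1)
      have hPf : Pf pat t (i0 + 1) = Pf pat t i0 + pcost pat t i0 := rfl
      rw [hPf]
      congr 1
      rw [pcost, ← ha]
      by_cases h : a = pat.getD (i0 % 3) ' ' <;> simp [h]
    rw [show ((i0:Int) + 1) = ((i0 + 1 : Nat) : Int) by push_cast; ring]
    rw [hstep]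
    rw [ih (i0 + 1) (fun j hj => by
      have := hidx (j+1) (by simpa using hj)
      simpa [Nat.add_assoc, Nat.add_comm 1 j] using this)]
    congr 2
    simp only [List.length_cons]
    omega

lemma prefix_eq (pat t : List Char) :
    altPrefix pat t = (List.range (t.length + 1)).map (Pf pat t) := by
  have := prefix_loop pat t t 0 (fun j hj => by simp [List.getD, List.getElem?_eq_getElem hj])
  simpa [altPrefix, Pf] using this

def Wc (pat t : List Char) (K j : Nat) : Int :=
  Pf pat t (min (j + K) t.length) - Pf pat t j

def stepW (t : List Char) (K : Nat) (best : Int) (j : Nat) : Int :=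
  min (min (min best (Wc "RGB".toList t K j)) (Wc "GBR".toList t K j)) (Wc "BRG".toList t K j)

lemma loop2 (s : String) (k : Int) (K : Nat) (hk : k = (K : Int))
    (hch : ∀ c ∈ s.toList, RGBc c) :
    ∀ (l : List Char) (m : Nat) (mg : Int),
    K + m ≤ s.toList.length → l = s.toList.drop (K + m) →
    ((PySem.List.enumerate l (m : Int)).foldl
      (fun (st : Int × Int × Int × Int) ic =>
        let i : Int := ic.1 + k
        let prev : Char := (PySem.Str.pyGet? s (i - k)).getD ' '
        let r := st.2.1 - (if pyMatches (i - k) prev 0 then 0 else 1)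
                        + (if pyMatches i ic.2 0 then 0 else 1)
        let g := st.2.2.1 - (if pyMatches (i - k) prev 1 then 0 else 1)
                          + (if pyMatches i ic.2 1 then 0 else 1)
        let b := st.2.2.2 - (if pyMatches (i - k) prev 2 then 0 else 1)
                          + (if pyMatches i ic.2 2 then 0 else 1)
        (min (min (min st.1 r) g) b, r, g, b))
      (mg, Pf "RGB".toList s.toList (K + m) - Pf "RGB".toList s.toList m,
           Pf "GBR".toList s.toList (K + m) - Pf "GBR".toList s.toList m,
           Pf "BRG".toList s.toList (K + m) - Pf "BRG".toList s.toList m)).1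
    = ((List.range (s.toList.length - K - m)).map (fun j => m + 1 + j)).foldl
        (stepW s.toList K) mg := by
  intro l
  induction l with
  | nil =>
    intro m mg hle hdrop
    have hc := congrArg List.length hdrop
    simp only [List.length_nil, List.length_drop] at hc
    have hz : s.toList.length - K - m = 0 := by omega
    rw [hz]
    simp [PySem.List.enumerate_nil]
  | cons a l ih =>
    intro m mg hle hdrop
    set t := s.toList with ht
    have hlen : t.length - (K + m) = l.length + 1 := by
      have := congrArg List.length hdrop
      simp only [List.length_cons, List.length_drop] at this
      omega
    have hKm : K + m < t.length := by omega
    have hm : m < t.length := by omega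
    have hgetKm : t[K + m]? = some a := by
      have h0 : (t.drop (K + m))[0]? = some a := by rw [← hdrop]; simp
      rwa [List.getElem?_drop, Nat.add_zero] at h0
    have ha : a = t.getD (K + m) ' ' := by
      rw [List.getD_eq_getElem?_getD, hgetKm]; rfl
    have hrgba : RGBc a := hch a (by
      have : a ∈ t.drop (K + m) := by rw [← hdrop]; simp
      exact List.mem_of_mem_drop this)
    have hprevrgb : RGBc (t.getD m ' ') := by
      have : t.getD m ' ' = t[m] := by
        rw [List.getD_eq_getElem?_getD, List.getElem?_eq_getElem hm]; rfl
      rw [this]; exact hch _ (List.getElem_mem hm)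
    have hl' : l = t.drop (K + (m + 1)) := by
      have h := congrArg List.tail hdrop
      simp only [List.tail_cons] at h
      rw [h, List.tail_drop]
      congr 1
    rw [PySem.List.enumerate_cons, List.foldl_cons]
    have hpos1 : ((m : Int) + k - k) = ((m : Nat) : Int) := by ring
    have hpos2 : ((m : Int) + k) = ((m + K : Nat) : Int) := by rw [hk]; push_cast; ring
    have hprev : (PySem.Str.pyGet? s ((m : Nat) : Int)).getD ' ' = t.getD m ' ' := by
      rw [show PySem.Str.pyGet? s ((m : Nat) : Int) = PySem.List.pyGet? t ((m : Nat) : Int) from rfl,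
        PySem.List.pyGet?_natCast, List.getD_eq_getElem?_getD]
    simp only []
    rw [hpos1, hpos2, hprev]
    rw [cost0 t m _ hprevrgb rfl, cost1 t m _ hprevrgb rfl, cost2 t m _ hprevrgb rfl]
    rw [cost0 t (m + K) a hrgba (by rw [ha]; congr 1; omega),
        cost1 t (m + K) a hrgba (by rw [ha]; congr 1; omega),
        cost2 t (m + K) a hrgba (by rw [ha]; congr 1; omega)]
    have hr : ∀ pat : List Char,
        Pf pat t (K + m) - Pf pat t m - pcost pat t m + pcost pat t (m + K)
        = Pf pat t (K + (m + 1)) - Pf pat t (m + 1) := by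
      intro pat
      have e1 : Pf pat t (K + (m + 1)) = Pf pat t (K + m) + pcost pat t (K + m) := by
        rw [show K + (m + 1) = (K + m) + 1 by omega]; rfl
      have e2 : Pf pat t (m + 1) = Pf pat t m + pcost pat t m := rfl
      rw [e1, e2, show m + K = K + m by omega]; ring
    rw [show ((m : Int) + 1) = ((m + 1 : Nat) : Int) by push_cast; ring]
    rw [hr "RGB".toList, hr "GBR".toList, hr "BRG".toList]
    have hIH := ih (m + 1)
      (min (min (min mg (Pf "RGB".toList t (K + (m + 1)) - Pf "RGB".toList t (m + 1)))
          (Pf "GBR".toList t (K + (m + 1)) - Pf "GBR".toList t (m + 1)))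
        (Pf "BRG".toList t (K + (m + 1)) - Pf "BRG".toList t (m + 1)))
      (by omega) hl'
    simp only [] at hIH
    rw [hIH]
    have hmin : min (min (min mg (Pf "RGB".toList t (K + (m + 1)) - Pf "RGB".toList t (m + 1)))
          (Pf "GBR".toList t (K + (m + 1)) - Pf "GBR".toList t (m + 1)))
        (Pf "BRG".toList t (K + (m + 1)) - Pf "BRG".toList t (m + 1))
        = stepW t K mg (m + 1) := by
      unfold stepW Wc
      rw [show min (m + 1 + K) t.length = K + (m + 1) by omega]
    rw [hmin]
    have hrange : t.length - K - m = (t.length - K - (m + 1)) + 1 := by omega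
    rw [hrange, List.range_succ_eq_map, List.map_cons, List.foldl_cons, List.map_map]
    have h0 : stepW t K mg (m + 1 + 0) = stepW t K mg (m + 1) := by norm_num
    rw [h0]
    refine congrArg _ (List.map_congr_left (fun j _ => ?_))
    simp only [Function.comp_apply, Nat.succ_eq_add_one]
    omega

lemma A_eq (n k : Int) (s : String) (hk0 : 0 ≤ k)
    (hch : ∀ c ∈ s.toList, RGBc c) :
    solve_single_case n k s
      = (List.range (s.toList.length - k.toNat + 1)).foldl (stepW s.toList k.toNat) k := by
  set t := s.toList with ht
  set K := k.toNat with hKdef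
  have hk : k = (K : Int) := (Int.toNat_of_nonneg hk0).symm
  rw [solve_single_case]
  simp only []
  rw [PySem.List.slice_to _ hk0, PySem.List.slice_from _ hk0, ← hKdef, ← ht]
  have hL1 := loop1 t (t.take K) 0 0 0 0
    (fun j hj => by
      rw [List.getElem_take]
      rw [List.getD_eq_getElem?_getD, List.getElem?_eq_getElem (by simp at hj; omega)]
      simp)
    (fun c hc => hch c (List.mem_of_mem_take hc))
  simp only [Nat.cast_zero, zero_add, List.length_take] at hL1
  rw [hL1]
  have hmg : min (min (min k (Pf "RGB".toList t (min K t.length) - Pf "RGB".toList t 0))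
        (Pf "GBR".toList t (min K t.length) - Pf "GBR".toList t 0))
      (Pf "BRG".toList t (min K t.length) - Pf "BRG".toList t 0)
      = stepW t K k 0 := by
    unfold stepW Wc
    rw [show min (0 + K) t.length = min K t.length by omega]
  by_cases hKn : K ≤ t.length
  · -- window fits: apply the sliding-window invariant
    have hPfK : ∀ pat : List Char, Pf pat t (min K t.length) - Pf pat t 0
        = Pf pat t (K + 0) - Pf pat t 0 := by
      intro pat; rw [show min K t.length = K + 0 by omega]
    rw [hPfK "RGB".toList, hPfK "GBR".toList, hPfK "BRG".toList]
    have hL2 := loop2 s k K hk hch (t.drop K) 0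
      (min (min (min k (Pf "RGB".toList t (K + 0) - Pf "RGB".toList t 0))
          (Pf "GBR".toList t (K + 0) - Pf "GBR".toList t 0))
        (Pf "BRG".toList t (K + 0) - Pf "BRG".toList t 0))
      (by omega) (by rw [Nat.add_zero])
    simp only [Nat.cast_zero] at hL2
    rw [← ht] at hL2
    rw [hL2]
    rw [show min K t.length = K + 0 by omega] at hmg
    rw [hmg]
    rw [List.range_succ_eq_map, List.foldl_cons]
    congr 1
    rw [show t.length - K - 0 = t.length - K by omega]
    refine List.map_congr_left (fun j _ => ?_)
    simp only [Nat.succ_eq_add_one]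
    omega
  · -- k exceeds the string: the second loop is empty on both sides
    rw [List.drop_eq_nil_of_le (by omega)]
    rw [show PySem.List.enumerate ([] : List Char) (0 : Int) = [] from rfl, List.foldl_nil]
    rw [show t.length - K + 1 = 1 by omega, List.range_one, List.foldl_cons, List.foldl_nil]
    rw [hmg]

lemma inner_window (t : List Char) (K : Nat) (k : Int) (hk : k = (K : Int))
    (best : Int) (j : Nat) (hj : j ≤ t.length) :
    (["RGB".toList, "GBR".toList, "BRG".toList].map
        (fun pat => (List.range (t.length + 1)).map (Pf pat t))).foldl
      (fun best P =>
        min best ((PySem.List.pyGet? P (min ((0 + (j : Int)) + k) (t.length : Int))).getD 0 -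
                  (PySem.List.pyGet? P (0 + (j : Int))).getD 0))
      best
    = stepW t K best j := by
  have hget : ∀ (pat : List Char) (i : Nat), i ≤ t.length →
      (PySem.List.pyGet? ((List.range (t.length + 1)).map (Pf pat t)) ((i : Nat) : Int)).getD 0
        = Pf pat t i := by
    intro pat i hi
    rw [PySem.List.pyGet?_natCast]
    rw [List.getElem?_map, List.getElem?_range (by omega)]
    rfl
  have hmin : min ((0 + (j : Int)) + k) (t.length : Int) = ((min (j + K) t.length : Nat) : Int) := by
    rw [hk]; omega
  have hj0 : (0 + (j : Int)) = ((j : Nat) : Int) := by omega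
  simp only [List.map_cons, List.map_nil, List.foldl_cons, List.foldl_nil]
  have h1 : min (j + K) t.length ≤ t.length := by omega
  rw [hmin, hj0, hget "RGB".toList _ h1, hget "GBR".toList _ h1, hget "BRG".toList _ h1,
      hget "RGB".toList _ hj, hget "GBR".toList _ hj, hget "BRG".toList _ hj]
  rfl

lemma B_eq (n k : Int) (s : String) (hk0 : 0 ≤ k) :
    solve_single_case_alt n k s
      = (List.range (s.toList.length - k.toNat + 1)).foldl (stepW s.toList k.toNat) k := by
  set t := s.toList with ht
  set K := k.toNat with hKdef
  have hk : k = (K : Int) := (Int.toNat_of_nonneg hk0).symm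
  rw [solve_single_case_alt]
  simp only [prefix_eq]
  have hN : ((max ((t.length : Int) - k) 0 + 1) - 0).toNat = t.length - K + 1 := by omega
  rw [PySem.List.pyRange_one, hN, List.foldl_map]
  apply PySem.List.foldl_congr_mem
  intro best j hjmem
  have hj : j ≤ t.length := by
    have := List.mem_range.mp hjmem
    omega
  exact inner_window t K k hk best j hj

-- ===== VERDICT (by name: the statement is the Claim_ definition above) =====
theorem solve_single_case_spec : Claim_equal_solve_single_case := by
  intro n k s _ hpre
  obtain ⟨hk0, hall⟩ := hpre
  have hch : ∀ c ∈ s.toList, RGBc c := by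
    intro c hc
    have h := List.all_eq_true.mp hall c hc
    simp only [Bool.or_eq_true, beq_iff_eq] at h
    unfold RGBc
    tauto
  unfold Spec_solve_single_case
  rw [A_eq n k s hk0 hch, B_eq n k s hk0]
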